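-- pv_equiv track=rewrite | github.com/LEB-EPFL/ATS | Analysis/ATSSim_analysis.py | makeThrList
-- ===== SOURCE A (Python) =====
-- def makeThrList(infoList, thr):
--     infoListThr = [0]
--     for i in range(1, len(infoList)):
--         change = infoList[i] - infoList[i-1]
--         if infoList[i] - infoList[i-1] > thr:
--             infoListThr.append(infoListThr[-1] + change)
--         else:
--             infoListThr.append(infoListThr[-1])
--     return infoListThr
-- ===== SOURCE B (Python) =====
-- def makeThrList(infoList, thr):
--     # divide-and-conquer prefix sums of the thresholded consecutive differences
--     incs = [d if d > thr else 0
--             for d in (b - a for a, b in zip(infoList, infoList[1:]))]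
--
--     def prefix(xs):
--         if len(xs) <= 1:
--             return list(xs)
--         m = len(xs) // 2
--         left = prefix(xs[:m])
--         right = prefix(xs[m:])
--         t = left[-1]
--         return left + [t + r for r in right]
--
--     return [0] + prefix(incs)
-- ===== Notes on version B (the rewrite author's own statement) =====
-- stated objective: alternative
-- what changed: Replaces A's single left-to-right scan carrying a running total in acc[-1] by a divide-and-conquer prefix-sum: build the thresholded increment list, recursively compute prefix sums of each half, then offset the right half by the left half's total.
import Mathlib
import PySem

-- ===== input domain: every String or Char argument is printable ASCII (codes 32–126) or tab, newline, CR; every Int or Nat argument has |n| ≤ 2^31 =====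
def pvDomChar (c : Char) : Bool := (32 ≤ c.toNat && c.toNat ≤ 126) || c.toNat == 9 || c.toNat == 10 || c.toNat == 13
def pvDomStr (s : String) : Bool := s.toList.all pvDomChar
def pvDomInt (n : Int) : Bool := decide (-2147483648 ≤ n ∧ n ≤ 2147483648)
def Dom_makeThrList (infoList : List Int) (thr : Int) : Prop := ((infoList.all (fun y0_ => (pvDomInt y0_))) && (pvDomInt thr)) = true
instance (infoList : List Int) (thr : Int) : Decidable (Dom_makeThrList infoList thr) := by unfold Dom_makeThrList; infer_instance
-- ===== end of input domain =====

-- B replaces A's single left-to-right scan (running total in acc[-1]) by a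
-- divide-and-conquer prefix-sum over the thresholded increment list; alternative algorithm.

-- ===== PORT A =====
-- acc[-1] is ported as pyGetD acc (-1) 0: acc starts as [0] and only grows, so the
-- IndexError default is never taken; infoList[i] / infoList[i-1] likewise always in range.
def makeThrList (infoList : List Int) (thr : Int) : List Int :=
  (PySem.List.pyRange 1 (infoList.length : Int) 1).foldl (fun acc i =>
    let change := PySem.List.pyGetD infoList i 0 - PySem.List.pyGetD infoList (i - 1) 0
    if PySem.List.pyGetD infoList i 0 - PySem.List.pyGetD infoList (i - 1) 0 > thr then
      acc ++ [PySem.List.pyGetD acc (-1) 0 + change]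
    else
      acc ++ [PySem.List.pyGetD acc (-1) 0]) [0]

-- ===== PORT B =====
-- prefix(xs): divide and conquer; xs[:m]/xs[m:] are take/drop, left[-1] is pyGetD left (-1) 0
-- (left is nonempty whenever taken: m = len/2 ≥ 1 on the recursive branch).
def pvPrefix (xs : List Int) : List Int :=
  if _h : xs.length ≤ 1 then xs
  else
    let m := xs.length / 2
    let left := pvPrefix (xs.take m)
    let right := pvPrefix (xs.drop m)
    left ++ right.map (fun r => PySem.List.pyGetD left (-1) 0 + r)
termination_by xs.length
decreasing_by
  · simp only [List.length_take]; omega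
  · simp only [List.length_drop]; omega

-- zip(infoList, infoList[1:]) is ported as infoList.zip infoList.tail (exact: slice from 1);
-- the generator of diffs then the thresholding comprehension are the two maps.
def makeThrList_alt (infoList : List Int) (thr : Int) : List Int :=
  let incs := ((infoList.zip infoList.tail).map (fun p => p.2 - p.1)).map
    (fun d => if d > thr then d else 0)
  0 :: pvPrefix incs

-- ===== PRECONDITION & SPEC =====
def Spec_makeThrList (infoList : List Int) (thr : Int) (out : List Int) : Prop := out = makeThrList_alt infoList thr
instance (infoList : List Int) (thr : Int) (out : List Int) : Decidable (Spec_makeThrList infoList thr out) := by unfold Spec_makeThrList; infer_instance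

-- ===== CLAIM (what is proved, stated in full; the proofs are below) =====
def Claim_equal_makeThrList : Prop := ∀ (infoList : List Int) (thr : Int), Dom_makeThrList infoList thr → Spec_makeThrList infoList thr (makeThrList infoList thr)

-- ===== LEMMAS AND PROOFS =====

-- prefix sums of a list of increments, starting from running total t
def pvSums (t : Int) : List Int → List Int
  | [] => []
  | d :: ds => (t + d) :: pvSums (t + d) ds

-- final running total
def pvTot (t : Int) : List Int → Int
  | [] => t
  | d :: ds => pvTot (t + d) ds

def pvIncs (thr : Int) (l : List Int) : List Int :=
  (l.zip l.tail).map (fun p => if p.2 - p.1 > thr then p.2 - p.1 else 0)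

theorem pvSums_append (ds : List Int) : ∀ (es : List Int) (t : Int),
    pvSums t (ds ++ es) = pvSums t ds ++ pvSums (pvTot t ds) es := by
  induction ds with
  | nil => intro es t; simp [pvSums, pvTot]
  | cons d ds ih => intro es t; simp [pvSums, pvTot, ih]

theorem pvSums_shift (ds : List Int) : ∀ (s t : Int),
    pvSums (s + t) ds = (pvSums t ds).map (fun r => s + r) := by
  induction ds with
  | nil => intro s t; simp [pvSums]
  | cons d ds ih =>
    intro s t
    simp only [pvSums, List.map_cons, List.cons.injEq]
    constructor
    · ring
    · have := ih s (t + d)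
      rw [← this]; congr 1; ring

theorem pvSums_length (ds : List Int) : ∀ t, (pvSums t ds).length = ds.length := by
  induction ds with
  | nil => intro t; simp [pvSums]
  | cons d ds ih => intro t; simp [pvSums, ih]

theorem pvSums_ne_nil (ds : List Int) (t : Int) (h : ds ≠ []) : pvSums t ds ≠ [] := by
  intro hc
  have := pvSums_length ds t
  rw [hc] at this
  exact h (List.length_eq_zero_iff.mp this.symm)

theorem pvLast_sums' (ds : List Int) : ∀ (t : Int) (h : pvSums t ds ≠ []),
    (pvSums t ds).getLast h = pvTot t ds := by
  induction ds with
  | nil => intro t h; simp [pvSums] at h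
  | cons d ds ih =>
    intro t h
    cases ds with
    | nil => simp [pvSums, pvTot]
    | cons e es =>
      have hne : pvSums (t + d) (e :: es) ≠ [] := pvSums_ne_nil _ _ (by simp)
      exact (List.getLast_cons hne).trans (ih (t + d) hne)

theorem pvLast_sums (ds : List Int) : ∀ (t : Int),
    (t :: pvSums t ds).getLast (by simp) = pvTot t ds := by
  intro t
  cases hds : ds with
  | nil => simp [pvSums, pvTot]
  | cons e es =>
    have hne : pvSums t ds ≠ [] := by rw [hds]; exact pvSums_ne_nil _ _ (by simp)
    rw [← hds, List.getLast_cons hne]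
    exact pvLast_sums' ds t hne

theorem pvPrefix_eq (xs : List Int) : pvPrefix xs = pvSums 0 xs := by
  induction xs using pvPrefix.induct with
  | case1 xs h =>
    rw [pvPrefix, dif_pos h]
    match xs, h with
    | [], _ => simp [pvSums]
    | [x], _ => simp [pvSums]
  | case2 xs h m ihl ihr =>
    rw [pvPrefix, dif_neg h]
    simp only []
    rw [ihl, ihr]
    have hm1 : 1 ≤ xs.length / 2 := by omega
    have htake_ne : xs.take (xs.length / 2) ≠ [] := by
      intro hc
      have : (xs.take (xs.length / 2)).length = 0 := by rw [hc]; rfl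
      rw [List.length_take] at this; omega
    have hsne : pvSums 0 (xs.take (xs.length / 2)) ≠ [] :=
      pvSums_ne_nil _ _ htake_ne
    rw [PySem.List.pyGetD_neg_one _ 0 hsne]
    rw [pvLast_sums' _ _ hsne]
    conv_rhs => rw [← List.take_append_drop (xs.length / 2) xs]
    rw [pvSums_append]
    congr 1
    have := pvSums_shift (xs.drop (xs.length / 2)) (pvTot 0 (xs.take (xs.length / 2))) 0
    rw [add_zero] at this
    exact this.symm

theorem alt_eq (l : List Int) (thr : Int) :
    makeThrList_alt l thr = 0 :: pvSums 0 (pvIncs thr l) := by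
  simp only [makeThrList_alt, List.map_map, pvPrefix_eq]
  rfl

theorem pairs_snoc (l : List Int) (x : Int) (h : l ≠ []) :
    (l ++ [x]).zip (l ++ [x]).tail = l.zip l.tail ++ [(l.getLast h, x)] := by
  induction l with
  | nil => exact absurd rfl h
  | cons a l ih =>
    cases l with
    | nil => simp
    | cons b l => simpa [List.getLast_cons] using ih (by simp)

theorem incs_snoc (thr : Int) (l : List Int) (x : Int) (h : l ≠ []) :
    pvIncs thr (l ++ [x]) =
      pvIncs thr l ++ [if x - l.getLast h > thr then x - l.getLast h else 0] := by
  simp [pvIncs, pairs_snoc l x h]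

theorem A_snoc (l : List Int) (x thr : Int) (h : l ≠ []) :
    makeThrList (l ++ [x]) thr =
      makeThrList l thr ++
        [PySem.List.pyGetD (makeThrList l thr) (-1) 0 +
          (if x - l.getLast h > thr then x - l.getLast h else 0)] := by
  have hlen : 1 ≤ (l.length : Int) := by
    have := List.length_pos_iff.mpr h; omega
  unfold makeThrList
  have hsplit : PySem.List.pyRange 1 ((l ++ [x]).length : Int) 1
      = PySem.List.pyRange 1 (l.length : Int) 1 ++ [(l.length : Int)] := by
    have he : ((l ++ [x]).length : Int) = (l.length : Int) + 1 := by simp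
    rw [he, PySem.List.pyRange_one_succ_right hlen]
  rw [hsplit, List.foldl_append]
  have hbody : ∀ (acc : List Int), ∀ i ∈ PySem.List.pyRange 1 (l.length : Int) 1,
      (fun (acc : List Int) (i : Int) =>
        let change := PySem.List.pyGetD (l ++ [x]) i 0 - PySem.List.pyGetD (l ++ [x]) (i - 1) 0
        if PySem.List.pyGetD (l ++ [x]) i 0 - PySem.List.pyGetD (l ++ [x]) (i - 1) 0 > thr then
          acc ++ [PySem.List.pyGetD acc (-1) 0 + change]
        else
          acc ++ [PySem.List.pyGetD acc (-1) 0]) acc i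
      = (fun (acc : List Int) (i : Int) =>
        let change := PySem.List.pyGetD l i 0 - PySem.List.pyGetD l (i - 1) 0
        if PySem.List.pyGetD l i 0 - PySem.List.pyGetD l (i - 1) 0 > thr then
          acc ++ [PySem.List.pyGetD acc (-1) 0 + change]
        else
          acc ++ [PySem.List.pyGetD acc (-1) 0]) acc i := by
    intro acc i hi
    rw [PySem.List.mem_pyRange_one] at hi
    have h1 : PySem.List.pyGetD (l ++ [x]) i 0 = PySem.List.pyGetD l i 0 := by
      rw [PySem.List.pyGetD_eq_getElem (l ++ [x]) 0 (by omega) (by simp; omega),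
          PySem.List.pyGetD_eq_getElem l 0 (by omega) (by omega)]
      exact List.getElem_append_left (by omega)
    have h2 : PySem.List.pyGetD (l ++ [x]) (i - 1) 0 = PySem.List.pyGetD l (i - 1) 0 := by
      rw [PySem.List.pyGetD_eq_getElem (l ++ [x]) 0 (by omega) (by simp; omega),
          PySem.List.pyGetD_eq_getElem l 0 (by omega) (by omega)]
      exact List.getElem_append_left (by omega)
    simp only [h1, h2]
  rw [PySem.List.foldl_congr_mem _ _ _ _ hbody]
  have hx : PySem.List.pyGetD (l ++ [x]) (l.length : Int) 0 = x := by
    rw [PySem.List.pyGetD_eq_getElem (l ++ [x]) 0 (by omega) (by simp)]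
    simp
  have hlast : PySem.List.pyGetD (l ++ [x]) ((l.length : Int) - 1) 0 = l.getLast h := by
    rw [PySem.List.pyGetD_eq_getElem (l ++ [x]) 0 (by omega) (by simp)]
    rw [List.getElem_append_left (by omega)]
    rw [List.getLast_eq_getElem h]
    congr 1
    omega
  simp only [List.foldl_cons, List.foldl_nil, hx, hlast]
  split_ifs with hc
  · rfl
  · simp

theorem pvSums_snoc (ds : List Int) (t d : Int) :
    pvSums t (ds ++ [d]) = pvSums t ds ++ [pvTot t ds + d] := by
  rw [pvSums_append]; simp [pvSums]

theorem A_eq_B (l : List Int) (thr : Int) :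
    makeThrList l thr = 0 :: pvSums 0 (pvIncs thr l) := by
  induction l using List.reverseRecOn with
  | nil =>
    simp [makeThrList, pvIncs, pvSums, PySem.List.pyRange_one_eq_nil (by omega : (0:Int) ≤ 1)]
  | append_singleton l x ih =>
    rcases eq_or_ne l [] with rfl | h
    · simp [makeThrList, pvIncs, pvSums]
    · rw [A_snoc l x thr h, ih, incs_snoc thr l x h, pvSums_snoc]
      have hne : (0 : Int) :: pvSums 0 (pvIncs thr l) ≠ [] := by simp
      rw [PySem.List.pyGetD_neg_one _ 0 hne]
      simp [pvLast_sums]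

-- ===== VERDICT (by name: the statement is the Claim_ definition above) =====
theorem makeThrList_spec : Claim_equal_makeThrList := by
  intro infoList thr _
  unfold Spec_makeThrList
  rw [A_eq_B, alt_eq]
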